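-- pv_equiv track=rewrite | github.com/Kethambabu/st-automation | backend/core/executor/test_validator.py | _paths_match_with_params
-- ===== SOURCE A (Python) =====
-- def _paths_match_with_params(test_path: str, available_path: str) -> bool:
--     """Check if paths match with path parameters."""
--     test_parts = test_path.split("/")
--     avail_parts = available_path.split("/")
--
--     if len(test_parts) != len(avail_parts):
--         return False
--
--     for test_part, avail_part in zip(test_parts, avail_parts):
--         # Skip if available has path parameter placeholder
--         if "{" in avail_part and "}" in avail_part:
--             continue
--         if test_part != avail_part:
--             return False
--
--     return True
-- ===== SOURCE B (Python) =====
-- def _paths_match_with_params(test_path: str, available_path: str) -> bool: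
--     """Check if paths match with path parameters."""
--     def go(ts, avs):
--         if not ts and not avs:
--             return True
--         if not ts or not avs:
--             return False
--         a = avs[0]
--         if ('{' in a and '}' in a) or ts[0] == a:
--             return go(ts[1:], avs[1:])
--         return False
--     return go(test_path.split("/"), available_path.split("/"))
-- ===== Notes on version B (the rewrite author's own statement) =====
-- stated objective: alternative
-- what changed: Replaces the explicit length check plus for-loop over zip with a single simultaneous recursion on the two segment lists, where a length mismatch falls out of the base cases.
import Mathlib
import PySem

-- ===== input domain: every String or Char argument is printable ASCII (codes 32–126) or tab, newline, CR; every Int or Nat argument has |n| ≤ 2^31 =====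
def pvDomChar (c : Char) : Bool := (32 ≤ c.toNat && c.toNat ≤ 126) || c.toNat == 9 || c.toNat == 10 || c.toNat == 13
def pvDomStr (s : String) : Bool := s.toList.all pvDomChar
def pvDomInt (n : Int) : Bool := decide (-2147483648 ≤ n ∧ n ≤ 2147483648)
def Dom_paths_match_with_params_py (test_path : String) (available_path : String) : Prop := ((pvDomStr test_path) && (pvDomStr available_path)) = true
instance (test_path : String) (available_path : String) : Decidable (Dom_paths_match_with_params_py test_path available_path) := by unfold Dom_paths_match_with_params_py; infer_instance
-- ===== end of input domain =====

-- B replaces A's length check and for-loop over zip with one simultaneous recursion on the two segment lists (alternative decomposition, same cost).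

-- ===== PORT A =====
-- the for-loop over zip(test_parts, avail_parts) with early return
def pvLoopA : List (List Char × List Char) → Bool
  | [] => true
  | (test_part, avail_part) :: rest =>
      if PySem.Chars.isIn ['{'] avail_part && PySem.Chars.isIn ['}'] avail_part then
        pvLoopA rest
      else if test_part != avail_part then
        false
      else
        pvLoopA rest

def paths_match_with_params_py (test_path : String) (available_path : String) : Bool :=
  let test_parts := PySem.Chars.splitOn test_path.toList ['/']
  let avail_parts := PySem.Chars.splitOn available_path.toList ['/']
  if test_parts.length != avail_parts.length then false
  else pvLoopA (test_parts.zip avail_parts)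

-- ===== PORT B =====
-- simultaneous recursion on both segment lists; a length mismatch is a mixed base case
def pvGoB : List (List Char) → List (List Char) → Bool
  | [], [] => true
  | [], _ :: _ => false
  | _ :: _, [] => false
  | t :: ts, a :: avs =>
      if (PySem.Chars.isIn ['{'] a && PySem.Chars.isIn ['}'] a) || t == a then pvGoB ts avs
      else false

def paths_match_with_params_py_alt (test_path : String) (available_path : String) : Bool :=
  pvGoB (PySem.Chars.splitOn test_path.toList ['/']) (PySem.Chars.splitOn available_path.toList ['/'])

-- ===== PRECONDITION & SPEC =====
def Spec_paths_match_with_params_py (test_path : String) (available_path : String) (out : Bool) : Prop := out = paths_match_with_params_py_alt test_path available_path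
instance (test_path : String) (available_path : String) (out : Bool) : Decidable (Spec_paths_match_with_params_py test_path available_path out) := by unfold Spec_paths_match_with_params_py; infer_instance

-- ===== CLAIM (what is proved, stated in full; the proofs are below) =====
def Claim_equal_paths_match_with_params_py : Prop := ∀ (test_path : String) (available_path : String), Dom_paths_match_with_params_py test_path available_path → Spec_paths_match_with_params_py test_path available_path (paths_match_with_params_py test_path available_path)

-- ===== LEMMAS AND PROOFS =====
theorem pvLoopA_eq_pvGoB : ∀ (ts avs : List (List Char)),
    (if ts.length != avs.length then false else pvLoopA (ts.zip avs)) = pvGoB ts avs := by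
  intro ts
  induction ts with
  | nil => intro avs; cases avs <;> simp [pvLoopA, pvGoB]
  | cons t ts ih =>
      intro avs
      cases avs with
      | nil => simp [pvGoB]
      | cons a avs =>
          have h := ih avs
          by_cases hlen : ts.length = avs.length
          · simp only [List.length_cons, List.zip_cons_cons, pvLoopA, pvGoB]
            by_cases hb : (PySem.Chars.isIn ['{'] a && PySem.Chars.isIn ['}'] a) = true
            · simp [hb, hlen, ← h]
            · by_cases he : t = a
              · simp [hb, he, hlen, ← h]
              · simp [hb, he, hlen, bne]
          · have hgo : pvGoB ts avs = false := by
              rw [← h]; simp [hlen]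
            have hne : ((t :: ts).length != (a :: avs).length) = true := by
              simp [hlen]
            rw [if_pos hne]
            simp [pvGoB, hgo]

-- ===== VERDICT (by name: the statement is the Claim_ definition above) =====
theorem paths_match_with_params_py_spec : Claim_equal_paths_match_with_params_py := by
  intro test_path available_path _
  unfold Spec_paths_match_with_params_py paths_match_with_params_py paths_match_with_params_py_alt
  exact pvLoopA_eq_pvGoB _ _
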